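-- pv_equiv track=rewrite | github.com/shaynnguyen/scrabble | lab11.py | specificLength
-- ===== SOURCE A (Python) =====
-- def specificLength(s,l):
--     result = []
--     if l == 1:
--         for c in s:
--             result.append(c)
--         return result
--
--     for c in s:
--         words = specificLength(s.replace(c,'',1), l-1)
--         for w in words:
--             result.append(w+c)
--     return result
-- ===== SOURCE B (Python) =====
-- def specificLength(s, l):
--     # Iterative breadth-first expansion instead of A's recursion: keep a
--     # worklist of (remaining chars, word built so far) and expand it l times.
--     if l <= 0 or l > len(s):
--         return []
--     states = [(s, '')]
--     for _ in range(l):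
--         states = [(rem.replace(c, '', 1), c + w) for (rem, w) in states for c in rem]
--     return [w for (_, w) in states]
-- ===== Notes on version B (the rewrite author's own statement) =====
-- stated objective: alternative
-- what changed: Replaces A's recursion (recurse on the string minus one char, then suffix the chosen char) with an iterative level-by-level worklist of (remaining, word-so-far) pairs expanded l times.
import Mathlib
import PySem

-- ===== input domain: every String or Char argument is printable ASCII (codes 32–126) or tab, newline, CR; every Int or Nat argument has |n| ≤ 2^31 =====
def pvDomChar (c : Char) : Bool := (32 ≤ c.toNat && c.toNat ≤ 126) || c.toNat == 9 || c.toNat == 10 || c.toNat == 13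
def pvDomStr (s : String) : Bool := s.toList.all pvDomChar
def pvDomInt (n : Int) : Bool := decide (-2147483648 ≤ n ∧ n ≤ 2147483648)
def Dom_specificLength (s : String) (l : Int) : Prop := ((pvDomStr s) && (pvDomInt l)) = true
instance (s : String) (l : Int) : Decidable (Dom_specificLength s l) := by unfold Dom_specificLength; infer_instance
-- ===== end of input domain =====

-- B replaces A's recursion with an iterative level-by-level worklist expanded l times (alternative decomposition; return values proved equal).


-- ===== PORT A =====
-- s.replace(c, '', 1) for a single character c: remove the first occurrence of c (exact).
def rmFirst : List Char → Char → List Char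
  | [], _ => []
  | x :: xs, c => if x = c then xs else x :: rmFirst xs c

theorem rmFirst_length_lt (cs : List Char) (c : Char) (h : c ∈ cs) :
    (rmFirst cs c).length < cs.length := by
  induction cs with
  | nil => cases h
  | cons x xs ih =>
    simp only [rmFirst]
    split
    · simp
    · rename_i hx
      have hc : c ∈ xs := by
        rcases List.mem_cons.mp h with h1 | h1
        · exact absurd h1.symm hx
        · exact h1
      simpa using Nat.succ_lt_succ (ih hc)

-- literal transliteration of A's recursion (loops rendered as flatMap/map; attach carries membership for termination)
def specACore (cs : List Char) (l : Int) : List (List Char) :=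
  if l = 1 then cs.map (fun c => [c])
  else cs.attach.flatMap (fun x => (specACore (rmFirst cs x.1) (l - 1)).map (fun w => w ++ [x.1]))
termination_by cs.length
decreasing_by exact rmFirst_length_lt cs x.1 x.2

def specificLength (s : String) (l : Int) : List String :=
  (specACore s.toList l).map String.mk

-- ===== PORT B =====
-- one expansion step of the worklist: each (remaining, word) state branches on every remaining char
def stepB (states : List (List Char × List Char)) : List (List Char × List Char) :=
  states.flatMap (fun p => p.1.map (fun c => (rmFirst p.1 c, c :: p.2)))

def specificLength_alt (s : String) (l : Int) : List String :=
  if l ≤ 0 ∨ (s.toList.length : Int) < l then []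
  else (stepB^[l.toNat] [(s.toList, [])]).map (fun p => String.mk p.2)

-- ===== PRECONDITION & SPEC =====
def Spec_specificLength (s : String) (l : Int) (out : List String) : Prop := out = specificLength_alt s l
instance (s : String) (l : Int) (out : List String) : Decidable (Spec_specificLength s l out) := by unfold Spec_specificLength; infer_instance

-- ===== CLAIM (what is proved, stated in full; the proofs are below) =====
def Claim_equal_specificLength : Prop := ∀ (s : String) (l : Int), Dom_specificLength s l → Spec_specificLength s l (specificLength s l)

-- ===== LEMMAS AND PROOFS =====

-- A's recursion with the natural base case [""] at depth 0, counted in Nat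
def specA' (cs : List Char) : Nat → List (List Char)
  | 0 => [[]]
  | n + 1 => cs.flatMap (fun c => (specA' (rmFirst cs c) n).map (fun w => w ++ [c]))

theorem attach_flatMap_eq {α : Type} (cs : List Char) (f : {c // c ∈ cs} → List α)
    (g : Char → List α) (h : ∀ x : {c // c ∈ cs}, f x = g x.1) :
    cs.attach.flatMap f = cs.flatMap g := by
  rw [List.flatMap_subtype (g := g) (fun x hx => h ⟨x, hx⟩), List.unattach_attach]

theorem specACore_nonpos (cs : List Char) (l : Int) (hl : l ≤ 0) : specACore cs l = [] := by
  induction hn : cs.length using Nat.strong_induction_on generalizing cs l with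
  | _ n ih =>
    rw [specACore, if_neg (by omega)]
    subst hn
    rw [attach_flatMap_eq _ _ (fun _ => ([] : List (List Char)))
      (fun x => by rw [ih _ (rmFirst_length_lt cs x.1 x.2) _ _ (by omega) rfl]; rfl)]
    simp

theorem specACore_eq_specA' (cs : List Char) (l : Int) (hl : 1 ≤ l) :
    specACore cs l = specA' cs l.toNat := by
  induction hn : cs.length using Nat.strong_induction_on generalizing cs l with
  | _ n ih =>
    subst hn
    by_cases h1 : l = 1
    · subst h1
      rw [specACore, if_pos rfl]
      rw [List.map_eq_flatMap]; simp [specA']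
    · rw [specACore, if_neg h1]
      have ht : l.toNat = (l - 1).toNat + 1 := by omega
      rw [ht]
      rw [attach_flatMap_eq _ _
        (fun c => (specA' (rmFirst cs c) (l - 1).toNat).map (fun w => w ++ [c]))
        (fun x => by
          rw [ih _ (rmFirst_length_lt cs x.1 x.2) _ _ (by omega) rfl])]
      simp [specA']

theorem specA'_long (n : Nat) (cs : List Char) (h : cs.length < n) : specA' cs n = [] := by
  induction n generalizing cs with
  | zero => omega
  | succ n ih =>
    simp only [specA']
    rw [List.flatMap_eq_nil_iff.mpr]
    intro c hc
    rw [ih _ (by have := rmFirst_length_lt cs c hc; omega)]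
    rfl

theorem iter_stepB (n : Nat) (states : List (List Char × List Char)) :
    (stepB^[n] states).map (fun p => p.2)
      = states.flatMap (fun p => (specA' p.1 n).map (fun w => w ++ p.2)) := by
  induction n generalizing states with
  | zero => rw [List.map_eq_flatMap]; simp [specA']
  | succ n ih =>
    rw [Function.iterate_succ_apply, ih]
    rw [stepB, List.flatMap_assoc]
    congr 1
    funext p
    rw [List.flatMap_map]
    simp only [specA', List.map_flatMap, List.map_map]
    simp only [Function.comp_def, List.append_assoc, List.singleton_append]

-- ===== VERDICT (by name: the statement is the Claim_ definition above) =====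
theorem specificLength_spec : Claim_equal_specificLength := by
  intro s l _
  unfold Spec_specificLength specificLength specificLength_alt
  by_cases hl : l ≤ 0
  · rw [if_pos (Or.inl hl), specACore_nonpos _ _ hl]; rfl
  by_cases hlen : (s.toList.length : Int) < l
  · rw [if_pos (Or.inr hlen), specACore_eq_specA' _ _ (by omega),
      specA'_long _ _ (by omega)]
    rfl
  · rw [if_neg (by omega), specACore_eq_specA' _ _ (by omega)]
    have h := iter_stepB l.toNat [(s.toList, [])]
    simp only [List.flatMap_cons, List.flatMap_nil, List.append_nil] at h
    rw [show (fun p : List Char × List Char => String.mk p.2)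
        = String.mk ∘ (fun p : List Char × List Char => p.2) from rfl,
      ← List.map_map, h]
    simp
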